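-- pv_equiv track=rewrite | github.com/albvella/e-Link | Python/test_ADPCM.py | adpcm_compress
-- ===== SOURCE A (Python) =====
-- step_size_table = [
--     1, 1, 1, 1, 1, 2, 2, 2, 2, 2, 2, 3, 3, 3, 4, 4,
--     4, 5, 5, 6, 6, 7, 8, 8, 9, 10, 11, 12, 13, 15, 16, 18,
--     20, 22, 24, 26, 29, 32, 35, 38, 42, 46, 51, 56, 62, 68, 75, 83,
--     91, 100, 110, 121, 133, 146, 160, 176, 193, 212, 233, 256, 281, 308, 337, 369,
--     404, 442, 483, 528, 577, 630, 688, 751, 819, 893, 974, 1062, 1157, 1261, 1373, 1499,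
--     1629, 1682, 1850, 2035, 2238, 2462, 2709, 2979
-- ]
--
-- index_adjustment_table = [-1, -1, -1, -1, 2, 4, 6, 8]
--
-- class AdpcmState:
--     def __init__(self, prev=0, idx=0):
--         self.previous_value = prev
--         self.step_index = idx
--
-- def adpcm_compress(data):
--     state = AdpcmState(int(data[0]), 0)
--     compressed = [int(data[0])] # primo campione non compresso
--     packed_byte = None
--     for i in range(1, len(data)):
--         diff = int(data[i]) - state.previous_value
--         step = step_size_table[state.step_index]
--         nibble = 0
--         if diff < 0:
--             nibble = 8
--             diff = -diff
--         temp = diff * 4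
--         if temp < step:
--             nibble |= 0
--         else:
--             nibble |= min(7, temp // step)
--         # Ricostruzione per predizione
--         reconstructed_diff = (step * (nibble & 7)) // 4 + step // 8
--         if nibble & 8:
--             reconstructed_diff = -reconstructed_diff
--         state.previous_value += reconstructed_diff
--         state.previous_value = max(-32768, min(32767, state.previous_value))
--         state.step_index += index_adjustment_table[nibble & 7]
--         state.step_index = max(0, min(87, state.step_index))
--         # Packing
--         if packed_byte is None:
--             packed_byte = nibble
--         else:
--             packed_byte |= (nibble << 4)
--             compressed.append(packed_byte)
--             packed_byte = None
--     if packed_byte is not None: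
--         compressed.append(packed_byte)
--     return compressed
-- ===== SOURCE B (Python) =====
-- step_size_table = [
--     1, 1, 1, 1, 1, 2, 2, 2, 2, 2, 2, 3, 3, 3, 4, 4,
--     4, 5, 5, 6, 6, 7, 8, 8, 9, 10, 11, 12, 13, 15, 16, 18,
--     20, 22, 24, 26, 29, 32, 35, 38, 42, 46, 51, 56, 62, 68, 75, 83,
--     91, 100, 110, 121, 133, 146, 160, 176, 193, 212, 233, 256, 281, 308, 337, 369,
--     404, 442, 483, 528, 577, 630, 688, 751, 819, 893, 974, 1062, 1157, 1261, 1373, 1499,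
--     1629, 1682, 1850, 2035, 2238, 2462, 2709, 2979
-- ]
--
-- index_adjustment_table = [-1, -1, -1, -1, 2, 4, 6, 8]
--
-- def _encode_nibble(prev, idx, sample):
--     """One ADPCM encoder step: returns (nibble, new_prev, new_idx)."""
--     diff = int(sample) - prev
--     step = step_size_table[idx]
--     nibble = 0
--     if diff < 0:
--         nibble = 8
--         diff = -diff
--     temp = diff * 4
--     if temp < step:
--         nibble |= 0
--     else:
--         nibble |= min(7, temp // step)
--     reconstructed_diff = (step * (nibble & 7)) // 4 + step // 8
--     if nibble & 8:
--         reconstructed_diff = -reconstructed_diff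
--     prev = max(-32768, min(32767, prev + reconstructed_diff))
--     idx = max(0, min(87, idx + index_adjustment_table[nibble & 7]))
--     return nibble, prev, idx
--
-- def adpcm_compress(data):
--     # Pass 1: encode every sample after the first into a nibble.
--     prev = int(data[0])
--     idx = 0
--     nibbles = []
--     for sample in data[1:]:
--         nibble, prev, idx = _encode_nibble(prev, idx, sample)
--         nibbles.append(nibble)
--     # Pass 2: pack nibbles two per byte; a lone trailing nibble stays raw.
--     out = [int(data[0])]
--     i = 0
--     while i + 1 < len(nibbles):
--         out.append(nibbles[i] | (nibbles[i + 1] << 4))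
--         i += 2
--     if i < len(nibbles):
--         out.append(nibbles[i])
--     return out
-- ===== Notes on version B (the rewrite author's own statement) =====
-- stated objective: alternative
-- what changed: A interleaves nibble packing into the encoder loop via a pending packed_byte; B splits the work into two passes: one loop that only emits the nibble stream, then a separate pairwise packing pass (low nibble | high nibble << 4, lone trailing nibble kept raw).
import Mathlib
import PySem

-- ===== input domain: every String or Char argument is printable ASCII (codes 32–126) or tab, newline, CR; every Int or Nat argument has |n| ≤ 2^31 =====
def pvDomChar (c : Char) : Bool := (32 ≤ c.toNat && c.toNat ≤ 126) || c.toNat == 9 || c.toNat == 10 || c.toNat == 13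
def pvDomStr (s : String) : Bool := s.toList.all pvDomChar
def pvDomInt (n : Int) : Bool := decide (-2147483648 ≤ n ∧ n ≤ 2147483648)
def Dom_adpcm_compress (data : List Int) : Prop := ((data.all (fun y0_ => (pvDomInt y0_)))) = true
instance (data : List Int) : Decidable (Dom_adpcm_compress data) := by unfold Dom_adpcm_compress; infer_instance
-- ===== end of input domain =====

-- B reorganises A's single loop into two passes (encode nibbles, then pack pairs); equal return values, no speed claim.

def pvStepTable : List Int := [
    1, 1, 1, 1, 1, 2, 2, 2, 2, 2, 2, 3, 3, 3, 4, 4,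
    4, 5, 5, 6, 6, 7, 8, 8, 9, 10, 11, 12, 13, 15, 16, 18,
    20, 22, 24, 26, 29, 32, 35, 38, 42, 46, 51, 56, 62, 68, 75, 83,
    91, 100, 110, 121, 133, 146, 160, 176, 193, 212, 233, 256, 281, 308, 337, 369,
    404, 442, 483, 528, 577, 630, 688, 751, 819, 893, 974, 1062, 1157, 1261, 1373, 1499,
    1629, 1682, 1850, 2035, 2238, 2462, 2709, 2979]

def pvIdxAdjTable : List Int := [-1, -1, -1, -1, 2, 4, 6, 8]

-- ===== PORT A =====
-- one iteration of A's loop body; state = (previous_value, step_index, compressed, packed_byte)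
def pvAStep (st : Int × Int × List Int × Option Int) (x : Int) : Int × Int × List Int × Option Int :=
  let prev := st.1
  let idx := st.2.1
  let compressed := st.2.2.1
  let packed := st.2.2.2
  let diff := x - prev
  let step := PySem.List.pyGetD pvStepTable idx 0
  let nibble : Int := 0
  let nd := if diff < 0 then ((8 : Int), -diff) else (nibble, diff)
  let nibble := nd.1
  let diff := nd.2
  let temp := diff * 4
  let nibble := if temp < step then PySem.Int.bor nibble 0 else PySem.Int.bor nibble (min 7 (PySem.Int.floordiv temp step))
  let rd := PySem.Int.floordiv (step * (PySem.Int.band nibble 7)) 4 + PySem.Int.floordiv step 8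
  let rd := if PySem.Int.band nibble 8 ≠ 0 then -rd else rd
  let prev := max (-32768) (min 32767 (prev + rd))
  let idx := max 0 (min 87 (idx + PySem.List.pyGetD pvIdxAdjTable (PySem.Int.band nibble 7) 0))
  match packed with
  | none => (prev, idx, compressed, some nibble)
  | some pb => (prev, idx, compressed ++ [PySem.Int.bor pb (nibble <<< (4 : Nat))], none)

def adpcm_compress (data : List Int) : List Int :=
  let d0 := PySem.List.pyGetD data 0 0        -- data[0]; empty data excluded by Pre_
  let st := (PySem.List.pyRange 1 (data.length : Int) 1).foldl
      (fun acc i => pvAStep acc (PySem.List.pyGetD data i 0)) (d0, 0, [d0], (none : Option Int))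
  match st.2.2.2 with
  | none => st.2.2.1
  | some pb => st.2.2.1 ++ [pb]

-- ===== PORT B =====
-- B's helper _encode_nibble: returns (nibble, new_prev, new_idx)
def pvEncodeNibble (prev idx sample : Int) : Int × Int × Int :=
  let diff := sample - prev
  let step := PySem.List.pyGetD pvStepTable idx 0
  let nibble : Int := 0
  let nd := if diff < 0 then ((8 : Int), -diff) else (nibble, diff)
  let nibble := nd.1
  let diff := nd.2
  let temp := diff * 4
  let nibble := if temp < step then PySem.Int.bor nibble 0 else PySem.Int.bor nibble (min 7 (PySem.Int.floordiv temp step))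
  let rd := PySem.Int.floordiv (step * (PySem.Int.band nibble 7)) 4 + PySem.Int.floordiv step 8
  let rd := if PySem.Int.band nibble 8 ≠ 0 then -rd else rd
  (nibble, max (-32768) (min 32767 (prev + rd)), max 0 (min 87 (idx + PySem.List.pyGetD pvIdxAdjTable (PySem.Int.band nibble 7) 0)))

-- B's pass-2 while loop: pack nibbles two per byte, lone trailing nibble stays raw
def pvPack : List Int → List Int
  | [] => []
  | [n] => [n]
  | n1 :: n2 :: ns => (PySem.Int.bor n1 (n2 <<< (4 : Nat))) :: pvPack ns

def adpcm_compress_alt (data : List Int) : List Int :=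
  let d0 := PySem.List.pyGetD data 0 0        -- data[0]; empty data excluded by Pre_
  let fin := (PySem.List.slice data (some 1) none).foldl
      (fun (acc : Int × Int × List Int) sample =>
        let r := pvEncodeNibble acc.1 acc.2.1 sample
        (r.2.1, r.2.2, acc.2.2 ++ [r.1])) (d0, 0, ([] : List Int))
  [d0] ++ pvPack fin.2.2

-- ===== PRECONDITION & SPEC =====
-- A raises IndexError on the empty list (data[0]); excluded.
def Pre_adpcm_compress (data : List Int) : Prop := data ≠ []
instance (data : List Int) : Decidable (Pre_adpcm_compress data) := by unfold Pre_adpcm_compress; infer_instance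
def pvWitness_adpcm_compress : List Int := [0, 100, -50, 7]

def Spec_adpcm_compress (data : List Int) (out : List Int) : Prop := out = adpcm_compress_alt data
instance (data : List Int) (out : List Int) : Decidable (Spec_adpcm_compress data out) := by unfold Spec_adpcm_compress; infer_instance

-- ===== CLAIM (what is proved, stated in full; the proofs are below) =====
def Claim_equal_adpcm_compress : Prop := ∀ (data : List Int), Dom_adpcm_compress data → Pre_adpcm_compress data → Spec_adpcm_compress data (adpcm_compress data)

-- ===== LEMMAS AND PROOFS =====

-- the nibble stream produced by the shared encoder recurrence
def pvNibs (prev idx : Int) : List Int → List Int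
  | [] => []
  | x :: xs =>
    let r := pvEncodeNibble prev idx x
    r.1 :: pvNibs r.2.1 r.2.2 xs

-- packing with a pending low nibble
def pvPackPend (pb : Int) : List Int → List Int
  | [] => [pb]
  | n :: ns => (PySem.Int.bor pb (n <<< (4 : Nat))) :: pvPack ns

def pvPackOpt : Option Int → List Int → List Int
  | none, l => pvPack l
  | some pb, l => pvPackPend pb l

theorem pvPack_cons (n : Int) (ns : List Int) : pvPack (n :: ns) = pvPackPend n ns := by
  cases ns <;> rfl

theorem pvAStep_eq (p i : Int) (c : List Int) (pk : Option Int) (x : Int) :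
    pvAStep (p, i, c, pk) x =
      (let r := pvEncodeNibble p i x
       match pk with
       | none => (r.2.1, r.2.2, c, some r.1)
       | some pb => (r.2.1, r.2.2, c ++ [PySem.Int.bor pb (r.1 <<< (4 : Nat))], none)) := by
  cases pk <;> rfl

-- A's loop with finalization equals the concatenation of pending packing over the nibble stream
theorem pvA_loop (xs : List Int) : ∀ (prev idx : Int) (comp : List Int) (packed : Option Int),
    (let st := xs.foldl pvAStep (prev, idx, comp, packed)
     match st.2.2.2 with
     | none => st.2.2.1
     | some pb => st.2.2.1 ++ [pb]) = comp ++ pvPackOpt packed (pvNibs prev idx xs) := by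
  induction xs with
  | nil => intro prev idx comp packed; cases packed <;> simp [pvNibs, pvPackOpt, pvPackPend, pvPack]
  | cons x xs ih =>
    intro prev idx comp packed
    simp only [List.foldl_cons, pvAStep_eq]
    cases packed with
    | none =>
      simp only [pvNibs, pvPackOpt, pvPack_cons]
      exact ih _ _ _ _
    | some pb =>
      simp only [pvNibs, pvPackOpt, pvPackPend]
      rw [ih _ _ _ (none : Option Int)]
      simp [pvPackOpt]
  
-- B's first pass accumulates exactly the nibble stream
theorem pvB_loop (xs : List Int) : ∀ (prev idx : Int) (acc : List Int),
    (xs.foldl (fun (acc : Int × Int × List Int) sample =>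
        let r := pvEncodeNibble acc.1 acc.2.1 sample
        (r.2.1, r.2.2, acc.2.2 ++ [r.1])) (prev, idx, acc)).2.2 = acc ++ pvNibs prev idx xs := by
  induction xs with
  | nil => intro prev idx acc; simp [pvNibs]
  | cons x xs ih =>
    intro prev idx acc
    simp only [List.foldl_cons, pvNibs]
    rw [ih]
    simp

-- ===== VERDICT (by name: the statement is the Claim_ definition above) =====
theorem adpcm_compress_spec : Claim_equal_adpcm_compress := by
  intro data _ hpre
  unfold Spec_adpcm_compress adpcm_compress adpcm_compress_alt
  cases data with
  | nil => exact absurd rfl hpre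
  | cons d rest =>
    simp only [PySem.List.pyGetD_zero_cons, PySem.List.slice_from_one, List.tail_cons]
    rw [PySem.List.foldl_pyRange_pyGetD' (d :: rest) 0 pvAStep (d, 0, [d], none) (by omega)]
    simp only [show ((1 : Int)).toNat = 1 from rfl, List.drop_one, List.tail_cons]
    rw [pvA_loop, pvB_loop]
    simp [pvPackOpt]
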